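-- pv_equiv track=rewrite | github.com/crowninda/rover-vision | rover_vision/driving.py | obstacle_relative_position
-- ===== SOURCE A (Python) =====
-- def obstacle_relative_position(scan_list: str) -> int:
--     '''
--     calculate the relative position of obstacles to the car
--
--     Args:
--         scan_list (str): Scan for obstacles
--
--     Rrturns:
--             pos (int): the obstacle is located relative to the car
--             max_obstacle (int): maximum obstacle size
--     '''
--     obstacle_number = [] # record the relative position of the obstacle to the car
--
--     paths = scan_list.split("2")
--     for path in paths:
--
--         # 0 here represents no obstacle, 1 represents 18 degrees (180 degrees divided by 10 sets of data)
--         obstacle_number.append(len(path))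
--     max_obstacle = max(obstacle_number)
--     largest_obstacle = obstacle_number.index(max_obstacle)
--
--     # find the location of the largest obstacle in scan_list
--     pos = scan_list.index(paths[largest_obstacle])
--
--     # determine whether the obstacle is located on the left front, right front or right front of the car
--     pos += int((len(paths[largest_obstacle]) - 1) / 3 )
--     return pos, max_obstacle
-- ===== SOURCE B (Python) =====
-- def obstacle_relative_position(scan_list: str) -> int:
--     # single pass: track current segment start; keep the first segment of maximal length
--     best_start = 0
--     best_len = -1
--     start = 0
--     for i, ch in enumerate(scan_list):
--         if ch == "2":
--             if i - start > best_len: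
--                 best_start, best_len = start, i - start
--             start = i + 1
--     if len(scan_list) - start > best_len:
--         best_start, best_len = start, len(scan_list) - start
--     pos = best_start + (best_len - 1) // 3 if best_len > 0 else best_start
--     return pos, best_len
-- ===== Notes on version B (the rewrite author's own statement) =====
-- stated objective: alternative
-- what changed: Replaces the split-on-separator + max + list.index + substring str.index re-search pipeline with one linear pass over the characters that tracks the current segment start and keeps the first longest segment, computing the position inline (no intermediate lists, no substring re-search).
import Mathlib
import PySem

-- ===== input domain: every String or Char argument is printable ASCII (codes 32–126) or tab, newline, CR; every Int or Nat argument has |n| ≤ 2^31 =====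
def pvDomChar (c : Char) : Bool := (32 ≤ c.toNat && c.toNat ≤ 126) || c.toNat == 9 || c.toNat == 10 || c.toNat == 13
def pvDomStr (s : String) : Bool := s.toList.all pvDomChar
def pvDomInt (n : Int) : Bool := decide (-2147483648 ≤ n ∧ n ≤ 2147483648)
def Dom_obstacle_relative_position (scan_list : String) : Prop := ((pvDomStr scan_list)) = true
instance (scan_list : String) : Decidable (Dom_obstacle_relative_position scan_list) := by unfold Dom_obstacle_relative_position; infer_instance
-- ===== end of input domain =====

-- B replaces the split+max+list.index+str.index pipeline with one linear pass tracking the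
-- current segment's start and keeping the first longest segment (objective: alternative algorithm).

-- ===== PORT A =====
def obstacle_relative_position (scan_list : String) : Int × Int :=
  -- paths = scan_list.split("2")  (separator is non-empty, so split? is always some)
  let paths := (PySem.Str.split? scan_list "2").getD []
  -- for path in paths: obstacle_number.append(len(path))
  let obstacle_number := paths.foldl (fun acc path => acc ++ [PySem.Str.len path]) []
  -- max(obstacle_number): the list is never empty (split yields ≥ 1 piece), so max never raises
  let max_obstacle := (PySem.List.max? obstacle_number (fun x => x)).getD 0
  -- obstacle_number.index(max_obstacle): the maximum is an element, so .index never raises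
  let largest_obstacle := (PySem.List.index? obstacle_number max_obstacle).getD 0
  -- paths[largest_obstacle]: index is in range
  let content := (PySem.List.pyGet? paths (largest_obstacle : Int)).getD ""
  -- scan_list.index(content): content always occurs in scan_list, so .index = .find here (exact)
  let pos := PySem.Str.find scan_list content
  -- pos += int((len(content) - 1) / 3): float division + int() = truncating division (exact here)
  (pos + PySem.Int.truncdiv (PySem.Str.len content - 1) 3, max_obstacle)

-- ===== PORT B =====
-- Source B's loop over enumerate(scan_list), state (start, best_start, best_len)
def pvAltGo : List Char → Nat → Nat → Nat → Int → Nat × Int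
  | [], i, start, bestStart, bestLen =>
      if ((i : Int) - start) > bestLen then (start, (i : Int) - start) else (bestStart, bestLen)
  | c :: rest, i, start, bestStart, bestLen =>
      if c = '2' then
        if ((i : Int) - start) > bestLen then pvAltGo rest (i+1) (i+1) start ((i : Int) - start)
        else pvAltGo rest (i+1) (i+1) bestStart bestLen
      else pvAltGo rest (i+1) start bestStart bestLen

def obstacle_relative_position_alt (scan_list : String) : Int × Int :=
  let r := pvAltGo scan_list.toList 0 0 0 (-1)
  let pos : Int := if r.2 > 0 then (r.1 : Int) + PySem.Int.floordiv (r.2 - 1) 3 else (r.1 : Int)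
  (pos, r.2)

-- ===== PRECONDITION & SPEC =====
def Spec_obstacle_relative_position (scan_list : String) (out : Int × Int) : Prop := out = obstacle_relative_position_alt scan_list
instance (scan_list : String) (out : Int × Int) : Decidable (Spec_obstacle_relative_position scan_list out) := by unfold Spec_obstacle_relative_position; infer_instance

-- ===== CLAIM (what is proved, stated in full; the proofs are below) =====
def Claim_equal_obstacle_relative_position : Prop := ∀ (scan_list : String), Dom_obstacle_relative_position scan_list → Spec_obstacle_relative_position scan_list (obstacle_relative_position scan_list)

-- ===== LEMMAS AND PROOFS =====

-- the segments of l between '2' separators, as str.split('2') yields them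
def pvSegs : List Char → List (List Char)
  | [] => [[]]
  | c :: t =>
    if c = '2' then [] :: pvSegs t
    else match pvSegs t with
      | [] => [[c]]
      | h :: r => (c :: h) :: r

def pvJoin : List (List Char) → List Char
  | [] => []
  | [s] => s
  | s :: r => s ++ '2' :: pvJoin r

-- first segment whose length is M
def pvFirstMaxSeg : List (List Char) → Nat → List Char
  | [], _ => []
  | h :: r, M => if h.length = M then h else pvFirstMaxSeg r M

-- start position of the first segment whose length is M
def pvFirstMaxStart : List Nat → Nat → Nat
  | [], _ => 0
  | n :: r, M => if n = M then 0 else n + 1 + pvFirstMaxStart r M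

def pvMaxL (L : List Nat) : Nat := L.foldr max 0

def pvHeadAdd (e : Nat) : List Nat → List Nat
  | [] => []
  | n :: r => (e + n) :: r

-- B's loop abstracted to the list of segment lengths
def pvPick : List Nat → Nat → Nat → Int → Nat × Int
  | [], _, bS, bL => (bS, bL)
  | n :: r, pos, bS, bL =>
      if (n : Int) > bL then pvPick r (pos + n + 1) pos n else pvPick r (pos + n + 1) bS bL

theorem pvSegs_ne_nil (l : List Char) : pvSegs l ≠ [] := by
  induction l with
  | nil => simp [pvSegs]
  | cons c t ih =>
    simp only [pvSegs]
    split
    · simp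
    · cases h : pvSegs t <;> simp
theorem pvSegs_no_two (l : List Char) : ∀ s ∈ pvSegs l, '2' ∉ s := by
  induction l with
  | nil => simp [pvSegs]
  | cons c t ih =>
    simp only [pvSegs]
    split
    · intro s hs
      rcases List.mem_cons.1 hs with h | h
      · simp [h]
      · exact ih s h
    · rename_i hc
      cases h : pvSegs t with
      | nil => exact absurd h (pvSegs_ne_nil t)
      | cons hd r =>
        intro s hs
        rcases List.mem_cons.1 hs with h' | h'
        · subst h'
          have := ih hd (h ▸ List.mem_cons_self ..)
          simp [hc, this]
          intro hh; exact absurd hh.symm hc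
        · exact ih s (h ▸ List.mem_cons_of_mem _ h')
theorem pvJoin_segs (l : List Char) : pvJoin (pvSegs l) = l := by
  induction l with
  | nil => simp [pvSegs, pvJoin]
  | cons c t ih =>
    simp only [pvSegs]
    split
    · rename_i hc
      subst hc
      cases h : pvSegs t with
      | nil => exact absurd h (pvSegs_ne_nil t)
      | cons hd r =>
        rw [h] at ih
        cases r with
        | nil => simpa [pvJoin] using ih
        | cons a b => simpa [pvJoin] using ih
    · cases h : pvSegs t with
      | nil => exact absurd h (pvSegs_ne_nil t)
      | cons hd r =>
        rw [h] at ih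
        cases r <;> simp_all [pvJoin]
def pvPrep (x : List Char) : List (List Char) → List (List Char)
  | [] => [x]
  | h :: r => (x ++ h) :: r

theorem pvGo_eq : ∀ (fuel : Nat) (l cur : List Char) (acc : List (List Char)), l.length < fuel →
    PySem.Chars.splitOn.go ['2'] fuel l cur acc = acc.reverse ++ pvPrep cur.reverse (pvSegs l) := by
  intro fuel
  induction fuel with
  | zero => intro l cur acc h; omega
  | succ f ih =>
    intro l cur acc h
    cases l with
    | nil => simp [PySem.Chars.splitOn.go, pvSegs, pvPrep]
    | cons c rest =>
      by_cases hc : c = '2'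
      · subst hc
        rw [show PySem.Chars.splitOn.go ['2'] (f+1) ('2'::rest) cur acc
            = PySem.Chars.splitOn.go ['2'] f rest [] (cur.reverse :: acc) by
          simp [PySem.Chars.splitOn.go, List.isPrefixOf]]
        rw [ih rest [] (cur.reverse :: acc) (by simp at h; omega)]
        cases hseg : pvSegs rest with
        | nil => exact absurd hseg (pvSegs_ne_nil rest)
        | cons hh rr => simp [pvSegs, pvPrep, hseg]
      · rw [show PySem.Chars.splitOn.go ['2'] (f+1) (c::rest) cur acc
            = PySem.Chars.splitOn.go ['2'] f rest (c :: cur) acc by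
          simp [PySem.Chars.splitOn.go, List.isPrefixOf, Ne.symm hc]]
        rw [ih rest (c :: cur) acc (by simp at h ⊢; omega)]
        cases hseg : pvSegs rest with
        | nil => exact absurd hseg (pvSegs_ne_nil rest)
        | cons hh rr => simp [pvSegs, pvPrep, hseg, hc]

theorem pvSplitOn_eq_segs (l : List Char) : PySem.Chars.splitOn l ['2'] = pvSegs l := by
  show PySem.Chars.splitOn.go ['2'] (l.length + 1) l [] [] = pvSegs l
  rw [pvGo_eq (l.length + 1) l [] [] (by omega)]
  cases hseg : pvSegs l with
  | nil => exact absurd hseg (pvSegs_ne_nil l)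
  | cons hh rr => simp [pvPrep]

theorem pvMaxL_mem (L : List Nat) (h : L ≠ []) : pvMaxL L ∈ L := by
  induction L with
  | nil => simp at h
  | cons n r ih =>
    cases r with
    | nil => simp [pvMaxL]
    | cons m r' =>
      rcases Nat.le_total (pvMaxL (m :: r')) n with hle | hle
      · have : pvMaxL (n :: m :: r') = n := by
          simp only [pvMaxL, List.foldr] at *
          omega
        simp [this]
      · have : pvMaxL (n :: m :: r') = pvMaxL (m :: r') := by
          simp only [pvMaxL, List.foldr] at *
          omega
        rw [this]
        exact List.mem_cons_of_mem _ (ih (by simp))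
theorem pvFirstMaxSeg_spec (ss : List (List Char)) (M : Nat) (h : M ∈ ss.map List.length) :
    (pvFirstMaxSeg ss M).length = M ∧ pvFirstMaxSeg ss M ∈ ss := by
  induction ss with
  | nil => simp at h
  | cons hd r ih =>
    by_cases hc : hd.length = M
    · simp [pvFirstMaxSeg, hc]
    · have hm : M ∈ r.map List.length := by
        simp only [List.map_cons, List.mem_cons] at h
        rcases h with h | h
        · exact absurd h.symm hc
        · exact h
      have := ih hm
      simp [pvFirstMaxSeg, hc]
      exact ⟨this.1, Or.inr this.2⟩
theorem pvFind_eq (l sub : List Char) (p : Nat) (h1 : sub <+: l.drop p)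
    (h2 : ∀ i < p, ¬ sub <+: l.drop i) : PySem.Chars.find l sub = p := by
  have hinf : sub <:+: l := h1.isInfix.trans (List.drop_suffix p l).isInfix
  have hnn : 0 ≤ PySem.Chars.find l sub := (PySem.Chars.find_nonneg_iff l sub).2 hinf
  obtain ⟨ha, hb⟩ := PySem.Chars.find_spec hnn
  set f := (PySem.Chars.find l sub).toNat with hf
  have hfp : f = p := by
    rcases Nat.lt_trichotomy f p with h | h | h
    · exact absurd ha (h2 f h)
    · exact h
    · exact absurd h1 (hb p h)
  have := Int.toNat_of_nonneg hnn
  omega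
theorem pvFind_firstMaxSeg (ss : List (List Char)) (hne : ss ≠ [])
    (h2 : ∀ s ∈ ss, '2' ∉ s) :
    PySem.Chars.find (pvJoin ss) (pvFirstMaxSeg ss (pvMaxL (ss.map List.length)))
      = (pvFirstMaxStart (ss.map List.length) (pvMaxL (ss.map List.length)) : Int) := by
  induction ss with
  | nil => exact absurd rfl hne
  | cons s t ih =>
    cases t with
    | nil =>
      have hMe : pvMaxL ([s].map List.length) = s.length := by simp [pvMaxL]
      rw [hMe]
      simp only [pvJoin, pvFirstMaxSeg, pvFirstMaxStart, List.map_cons, if_pos]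
      simpa using pvFind_eq s s 0 (by simp) (by omega)
    | cons s2 t2 =>
      have hjoin : pvJoin (s :: s2 :: t2) = s ++ '2' :: pvJoin (s2 :: t2) := rfl
      have hM : pvMaxL ((s :: s2 :: t2).map List.length)
          = max s.length (pvMaxL ((s2 :: t2).map List.length)) := by simp [pvMaxL]
      set jt := pvJoin (s2 :: t2) with hjt
      set Mt := pvMaxL ((s2 :: t2).map List.length) with hMt
      by_cases hc : Mt ≤ s.length
      · have hMe : pvMaxL ((s :: s2 :: t2).map List.length) = s.length := by rw [hM]; omega
        rw [hMe]
        simp only [pvFirstMaxSeg, pvFirstMaxStart, List.map_cons, if_pos]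
        rw [hjoin]
        simpa using pvFind_eq (s ++ '2' :: jt) s 0 (by simpa using List.prefix_append s _)
          (by omega)
      · have hMe : pvMaxL ((s :: s2 :: t2).map List.length) = Mt := by rw [hM]; omega
        have hsne : s.length ≠ Mt := by omega
        rw [hMe]
        have hIH := ih (by simp) (fun x hx => h2 x (List.mem_cons_of_mem _ hx))
        set C := pvFirstMaxSeg (s2 :: t2) Mt with hC
        set pr := pvFirstMaxStart ((s2 :: t2).map List.length) Mt with hpr
        have hCfacts := pvFirstMaxSeg_spec (s2 :: t2) Mt
          (pvMaxL_mem ((s2 :: t2).map List.length) (by simp))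
        rw [← hC] at hCfacts
        obtain ⟨hClen, hCmem⟩ := hCfacts
        have hnn : (0 : Int) ≤ PySem.Chars.find jt C := by rw [hIH]; positivity
        obtain ⟨hpre, hmin⟩ := PySem.Chars.find_spec hnn
        rw [hIH, Int.toNat_natCast] at hpre hmin
        have hfms : pvFirstMaxSeg (s :: s2 :: t2) Mt = C := by
          simp [pvFirstMaxSeg, hsne, hC]
        have hfmst : pvFirstMaxStart ((s :: s2 :: t2).map List.length) Mt
            = s.length + 1 + pr := by
          simp [pvFirstMaxStart, hsne, hpr]
        rw [hfms, hfmst, hjoin]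
        have hC2 : '2' ∉ C := h2 C (List.mem_cons_of_mem _ hCmem)
        apply pvFind_eq
        · have : s.length + 1 + pr = s.length + (1 + pr) := by omega
          rw [this, List.drop_length_add_append]
          have : 1 + pr = pr + 1 := by omega
          rw [this, List.drop_succ_cons]
          exact hpre
        · intro i hi hbad
          by_cases hi2 : s.length + 1 ≤ i
          · have hdrop : (s ++ '2' :: jt).drop i = jt.drop (i - (s.length + 1)) := by
              conv_lhs => rw [show i = s.length + (1 + (i - (s.length + 1))) by omega]
              rw [List.drop_length_add_append,
                show 1 + (i - (s.length + 1)) = (i - (s.length + 1)) + 1 by omega,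
                List.drop_succ_cons]
            rw [hdrop] at hbad
            exact hmin (i - (s.length + 1)) (by omega) hbad
          · -- i ≤ s.length : C would have to contain the '2' at position s.length
            have hkC : s.length - i < C.length := by rw [hClen]; omega
            have hlen' : s.length < (s ++ '2' :: jt).length := by simp
            have hdl : s.length - i < ((s ++ '2' :: jt).drop i).length := by
              simp [List.length_drop]; omega
            have e3 : C[s.length - i]'hkC = ((s ++ '2' :: jt).drop i)[s.length - i]'hdl :=
              hbad.getElem hkC
            have e1 : ((s ++ '2' :: jt).drop i)[s.length - i]'hdl
                = (s ++ '2' :: jt)[s.length]'hlen' := by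
              rw [List.getElem_drop]
              congr 1
              omega
            have e2 : (s ++ '2' :: jt)[s.length]'hlen' = '2' := by
              rw [List.getElem_append_right (by omega)]
              simp
            exact hC2 (by rw [← e2, ← e1, ← e3]; exact List.getElem_mem hkC)

theorem pvAltGo_eq_pick (l : List Char) (extra start : Nat) (bS : Nat) (bL : Int) :
    pvAltGo l (start + extra) start bS bL
      = pvPick (pvHeadAdd extra ((pvSegs l).map List.length)) start bS bL := by
  induction l generalizing extra start bS bL with
  | nil =>
    have hcast : ((start + extra : Nat) : Int) - (start : Nat) = (extra : Int) := by
      push_cast; ring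
    simp only [pvAltGo, pvSegs, List.map_cons, List.map_nil, pvHeadAdd, pvPick, hcast]
    split_ifs with h1 h2 h2 <;> first | rfl | (exfalso; simp at h2; omega)
  | cons c t ih =>
    by_cases hc : c = '2'
    · subst hc
      have hcast : ((start + extra : Nat) : Int) - (start : Nat) = (extra : Int) := by
        push_cast; ring
      have hz : pvHeadAdd 0 ((pvSegs t).map List.length) = (pvSegs t).map List.length := by
        cases hseg : pvSegs t with
        | nil => exact absurd hseg (pvSegs_ne_nil t)
        | cons hh rr => simp [pvHeadAdd]
      have hL : pvAltGo ('2' :: t) (start + extra) start bS bL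
          = if (extra : Int) > bL
            then pvAltGo t (start + extra + 1) (start + extra + 1) start (extra : Int)
            else pvAltGo t (start + extra + 1) (start + extra + 1) bS bL := by
        simp [pvAltGo, hcast]
      have hR : pvPick (pvHeadAdd extra ((pvSegs ('2' :: t)).map List.length)) start bS bL
          = if (extra : Int) > bL
            then pvPick ((pvSegs t).map List.length) (start + extra + 1) start (extra : Int)
            else pvPick ((pvSegs t).map List.length) (start + extra + 1) bS bL := by
      -- pvSegs ('2'::t) = [] :: pvSegs t, headAdd gives (extra+0) :: lengths
        show pvPick ((extra + 0) :: (pvSegs t).map List.length) start bS bL = _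
        rw [show pvPick ((extra + 0) :: (pvSegs t).map List.length) start bS bL
            = if ((extra + 0 : Nat) : Int) > bL
              then pvPick ((pvSegs t).map List.length) (start + (extra + 0) + 1) start
                ((extra + 0 : Nat) : Int)
              else pvPick ((pvSegs t).map List.length) (start + (extra + 0) + 1) bS bL from rfl]
        norm_num
      rw [hL, hR]
      have h1 := ih 0 (start + extra + 1) start (extra : Int)
      have h2 := ih 0 (start + extra + 1) bS bL
      rw [Nat.add_zero, hz] at h1 h2
      split_ifs with hcond
      · exact h1
      · exact h2
    · have hstep : pvAltGo (c :: t) (start + extra) start bS bL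
          = pvAltGo t (start + extra + 1) start bS bL := by
        simp [pvAltGo, hc]
      rw [hstep, show start + extra + 1 = start + (extra + 1) by omega, ih (extra + 1)]
      cases hseg : pvSegs t with
      | nil => exact absurd hseg (pvSegs_ne_nil t)
      | cons hh rr =>
        have hL : pvSegs (c :: t) = (c :: hh) :: rr := by simp [pvSegs, hc, hseg]
        rw [hL]
        simp only [List.map_cons]
        rw [show pvHeadAdd (extra + 1) (hh.length :: rr.map List.length)
            = (extra + 1 + hh.length) :: rr.map List.length from rfl]
        rw [show pvHeadAdd extra ((c :: hh).length :: rr.map List.length)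
            = (extra + (c :: hh).length) :: rr.map List.length from rfl]
        congr 2
        simp [List.length_cons]
        omega

theorem pvPick_spec (L : List Nat) (pos bS : Nat) (bL : Int) (h : L ≠ []) :
    pvPick L pos bS bL =
      if (pvMaxL L : Int) > bL then (pos + pvFirstMaxStart L (pvMaxL L), (pvMaxL L : Int))
      else (bS, bL) := by
  induction L generalizing pos bS bL with
  | nil => exact absurd rfl h
  | cons n r ih =>
    cases r with
    | nil =>
      have hm : pvMaxL [n] = n := by simp [pvMaxL]
      rw [hm]
      simp only [pvPick, pvFirstMaxStart, if_pos rfl]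
      split_ifs with h1 <;> simp
    | cons m r' =>
      have hM : pvMaxL (n :: m :: r') = max n (pvMaxL (m :: r')) := by simp [pvMaxL]
      set Mr := pvMaxL (m :: r') with hMr
      rw [hM]
      by_cases h1 : (n : Int) > bL
      · rw [show pvPick (n :: m :: r') pos bS bL = pvPick (m :: r') (pos + n + 1) pos n by
          simp [pvPick, h1]]
        rw [ih (pos + n + 1) pos n (by simp)]
        by_cases h2 : n < Mr
        · rw [if_pos (by exact_mod_cast h2), if_pos (by push_cast; omega),
            show max n Mr = Mr by omega]
          simp only [pvFirstMaxStart, if_neg (by omega : ¬ n = Mr), Prod.mk.injEq]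
          exact ⟨by omega, trivial⟩
        · rw [if_neg (by push_cast; omega), if_pos (by push_cast; omega),
            show max n Mr = n by omega]
          simp [pvFirstMaxStart]
      · rw [show pvPick (n :: m :: r') pos bS bL = pvPick (m :: r') (pos + n + 1) bS bL by
          simp [pvPick, h1]]
        rw [ih (pos + n + 1) bS bL (by simp)]
        by_cases h2 : (Mr : Int) > bL
        · have hn : n < Mr := by
            have : (n : Int) ≤ bL := by omega
            exact_mod_cast lt_of_le_of_lt this h2
          rw [if_pos h2, if_pos (by push_cast; omega), show max n Mr = Mr by omega]
          simp only [pvFirstMaxStart, if_neg (by omega : ¬ n = Mr), Prod.mk.injEq]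
          exact ⟨by omega, trivial⟩
        · rw [if_neg h2, if_neg (by push_cast; omega)]

theorem pvSelect (ss : List (List Char)) (M : Nat) (h : M ∈ ss.map List.length) :
    ∃ j : Nat,
      PySem.List.index? (ss.map (fun seg => (seg.length : Int))) (M : Int) = some j ∧
      (ss.map String.ofList)[j]? = some (String.ofList (pvFirstMaxSeg ss M)) := by
  induction ss with
  | nil => simp at h
  | cons hd t ih =>
    by_cases hc : hd.length = M
    · refine ⟨0, ?_, ?_⟩
      · rw [List.map_cons, show ((hd.length : Int)) = (M : Int) by exact_mod_cast hc]
        exact PySem.List.index?_cons_self _ _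
      · simp [pvFirstMaxSeg, hc]
    · have hm : M ∈ t.map List.length := by
        simp only [List.map_cons, List.mem_cons] at h
        rcases h with h | h
        · exact absurd h.symm hc
        · exact h
      obtain ⟨j, hj1, hj2⟩ := ih hm
      refine ⟨j + 1, ?_, ?_⟩
      · rw [List.map_cons,
          PySem.List.index?_cons_of_ne _ (by exact_mod_cast hc), hj1]
        rfl
      · rw [List.map_cons, List.getElem?_cons_succ, hj2]
        simp [pvFirstMaxSeg, hc]

theorem pvDiv3 (M : Nat) :
    PySem.Int.truncdiv ((M : Int) - 1) 3
      = if (M : Int) > 0 then PySem.Int.floordiv ((M : Int) - 1) 3 else 0 := by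
  cases M with
  | zero => decide
  | succ k =>
    have h0 : (0:Int) ≤ (k+1:Nat) - 1 := by push_cast; omega
    rw [if_pos (by push_cast; omega)]
    rw [PySem.Int.truncdiv, Int.tdiv_eq_ediv_of_nonneg h0,
        PySem.Int.floordiv_eq_ediv_of_pos (by norm_num)]
theorem pvFoldlMaxCast (r : List Nat) (a : Nat) :
    List.foldl max ((a : Int)) (r.map (fun (n : Nat) => (n : Int))) = ((List.foldl max a r : Nat) : Int) := by
  induction r generalizing a with
  | nil => rfl
  | cons n t ih => rw [List.map_cons, List.foldl_cons, List.foldl_cons, ← Nat.cast_max, ih]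

theorem pvFoldlMax_eq_maxL (r : List Nat) (a : Nat) :
    List.foldl max a r = max a (pvMaxL r) := by
  induction r generalizing a with
  | nil => simp [pvMaxL]
  | cons n t ih =>
    rw [List.foldl_cons, ih, show pvMaxL (n :: t) = max n (pvMaxL t) from rfl]
    exact Nat.max_assoc a n (pvMaxL t)

theorem pvA_eq (s : String) :
    obstacle_relative_position s
      = ((pvFirstMaxStart ((pvSegs s.toList).map List.length)
            (pvMaxL ((pvSegs s.toList).map List.length)) : Int)
          + PySem.Int.truncdiv ((pvMaxL ((pvSegs s.toList).map List.length) : Int) - 1) 3,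
         (pvMaxL ((pvSegs s.toList).map List.length) : Int)) := by
  obtain ⟨n0, r0, hss⟩ : ∃ n0 r0, pvSegs s.toList = n0 :: r0 := by
    cases h : pvSegs s.toList with
    | nil => exact absurd h (pvSegs_ne_nil s.toList)
    | cons a b => exact ⟨_, _, rfl⟩
  have hLne : (pvSegs s.toList).map List.length ≠ [] := by rw [hss]; simp
  have hMem : pvMaxL ((pvSegs s.toList).map List.length) ∈ (pvSegs s.toList).map List.length :=
    pvMaxL_mem _ hLne
  obtain ⟨j, hidx, hget⟩ := pvSelect (pvSegs s.toList) _ hMem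
  obtain ⟨hClen, hCmem⟩ := pvFirstMaxSeg_spec (pvSegs s.toList) _ hMem
  have hsplit : PySem.Str.split? s "2" = some ((pvSegs s.toList).map String.ofList) := by
    have h2 : ("2" : String).toList = ['2'] := rfl
    simp [PySem.Str.split?, PySem.Chars.split?, h2, pvSplitOn_eq_segs]
  have hlens : ((pvSegs s.toList).map String.ofList).map PySem.Str.len
      = (pvSegs s.toList).map (fun seg => (seg.length : Int)) := by
    simp [PySem.Str.len, List.map_map, Function.comp_def]
  have hmax : PySem.List.max? ((pvSegs s.toList).map (fun seg => (seg.length : Int)))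
      (fun x => x) = some ((pvMaxL ((pvSegs s.toList).map List.length) : Int)) := by
    rw [hss, List.map_cons, PySem.List.max?_id_cons,
      show (r0.map fun seg => (seg.length : Int)) = (r0.map List.length).map (fun (n : Nat) => (n : Int))
        by rw [List.map_map]; rfl,
      pvFoldlMaxCast, pvFoldlMax_eq_maxL, List.map_cons]
    rfl
  have hfind : PySem.Chars.find s.toList (pvFirstMaxSeg (pvSegs s.toList)
        (pvMaxL ((pvSegs s.toList).map List.length)))
      = (pvFirstMaxStart ((pvSegs s.toList).map List.length)
          (pvMaxL ((pvSegs s.toList).map List.length)) : Int) := by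
    have h := pvFind_firstMaxSeg (pvSegs s.toList) (pvSegs_ne_nil s.toList)
      (pvSegs_no_two s.toList)
    rw [pvJoin_segs] at h
    exact h
  unfold obstacle_relative_position
  rw [hsplit]
  simp only [Option.getD_some]
  rw [PySem.List.foldl_append_singleton_eq_map, List.nil_append, hlens, hmax]
  simp only [Option.getD_some]
  rw [hidx]
  simp only [Option.getD_some]
  rw [PySem.List.pyGet?_natCast, hget]
  simp only [Option.getD_some]
  rw [show PySem.Str.find s (String.ofList (pvFirstMaxSeg (pvSegs s.toList)
        (pvMaxL ((pvSegs s.toList).map List.length))))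
      = PySem.Chars.find s.toList (pvFirstMaxSeg (pvSegs s.toList)
        (pvMaxL ((pvSegs s.toList).map List.length))) by
    simp [PySem.Str.find]]
  rw [hfind]
  rw [show PySem.Str.len (String.ofList (pvFirstMaxSeg (pvSegs s.toList)
        (pvMaxL ((pvSegs s.toList).map List.length))))
      = ((pvMaxL ((pvSegs s.toList).map List.length) : Nat) : Int) by
    simp [PySem.Str.len, hClen]]

theorem pvB_eq (s : String) :
    obstacle_relative_position_alt s
      = (if ((pvMaxL ((pvSegs s.toList).map List.length) : Int)) > 0
          then (pvFirstMaxStart ((pvSegs s.toList).map List.length)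
              (pvMaxL ((pvSegs s.toList).map List.length)) : Int)
            + PySem.Int.floordiv ((pvMaxL ((pvSegs s.toList).map List.length) : Int) - 1) 3
          else (pvFirstMaxStart ((pvSegs s.toList).map List.length)
              (pvMaxL ((pvSegs s.toList).map List.length)) : Int),
         (pvMaxL ((pvSegs s.toList).map List.length) : Int)) := by
  have hz : pvHeadAdd 0 ((pvSegs s.toList).map List.length)
      = (pvSegs s.toList).map List.length := by
    cases hseg : pvSegs s.toList with
    | nil => exact absurd hseg (pvSegs_ne_nil s.toList)
    | cons hh rr => simp [pvHeadAdd]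
  have hLne : (pvSegs s.toList).map List.length ≠ [] := by
    cases hseg : pvSegs s.toList with
    | nil => exact absurd hseg (pvSegs_ne_nil s.toList)
    | cons hh rr => simp
  have h0 : pvAltGo s.toList 0 0 0 (-1)
      = (pvFirstMaxStart ((pvSegs s.toList).map List.length)
          (pvMaxL ((pvSegs s.toList).map List.length)),
         (pvMaxL ((pvSegs s.toList).map List.length) : Int)) := by
    have h := pvAltGo_eq_pick s.toList 0 0 0 (-1)
    rw [Nat.add_zero, hz] at h
    rw [h, pvPick_spec _ 0 0 (-1) hLne, if_pos (by omega), Nat.zero_add]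
  unfold obstacle_relative_position_alt
  rw [h0]

-- ===== VERDICT (by name: the statement is the Claim_ definition above) =====
theorem obstacle_relative_position_spec : Claim_equal_obstacle_relative_position := by
  unfold Claim_equal_obstacle_relative_position
  intro s _
  unfold Spec_obstacle_relative_position
  rw [pvA_eq, pvB_eq, pvDiv3]
  split_ifs with h <;> simp
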